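-- pv_equiv track=rewrite | github.com/radhofan/DevMuT | code/DevMuT/common/mutation_torch/Other_utils.py | del_Cascade_op_info
-- ===== SOURCE A (Python) =====
-- def del_Cascade_op_info(qianqu_houji_list, del_layer_name):
--     """
--     delete del_layer_name itself and all of its childs
--     """
--     del_idxs = []
--     for idx in range(len(qianqu_houji_list)):
--         qianqu_houji_list_single = qianqu_houji_list[idx]
--         if del_layer_name in qianqu_houji_list_single:
--             del_idxs.append(idx)
--
--     del_flag = 0
--     for idx in del_idxs:
--         del qianqu_houji_list[idx - del_flag]
--         del_flag += 1
--     return qianqu_houji_list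
-- ===== SOURCE B (Python) =====
-- def del_Cascade_op_info(qianqu_houji_list, del_layer_name):
--     """
--     delete del_layer_name itself and all of its childs
--     """
--     idx = len(qianqu_houji_list) - 1
--     while idx >= 0:
--         if del_layer_name in qianqu_houji_list[idx]:
--             del qianqu_houji_list[idx]
--         idx -= 1
--     return qianqu_houji_list
-- ===== Notes on version B (the rewrite author's own statement) =====
-- stated objective: simpler
-- what changed: Replaces the two-pass scheme (collect matching indices, then delete them with an offset counter) by one reverse index pass that deletes in place immediately, eliminating the auxiliary index list and the del_flag.
import Mathlib
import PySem

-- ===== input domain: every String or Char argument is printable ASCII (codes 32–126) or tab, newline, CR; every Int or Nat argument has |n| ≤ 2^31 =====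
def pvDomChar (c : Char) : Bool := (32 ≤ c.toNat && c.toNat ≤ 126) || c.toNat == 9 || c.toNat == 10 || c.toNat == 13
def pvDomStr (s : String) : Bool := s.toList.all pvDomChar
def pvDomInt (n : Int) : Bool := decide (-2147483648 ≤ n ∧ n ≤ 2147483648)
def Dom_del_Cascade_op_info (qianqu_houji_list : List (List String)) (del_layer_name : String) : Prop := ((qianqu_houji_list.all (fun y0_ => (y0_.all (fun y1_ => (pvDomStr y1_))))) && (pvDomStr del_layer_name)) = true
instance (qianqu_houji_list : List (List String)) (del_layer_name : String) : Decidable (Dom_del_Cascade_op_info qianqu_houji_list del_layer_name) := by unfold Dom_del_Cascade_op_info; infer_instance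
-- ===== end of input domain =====

-- B replaces A's two passes (collect indices, then delete with an offset counter) by a single
-- reverse index pass deleting in place; equivalence is about the return value (both Pythons
-- mutate the argument list to the same final contents).

-- ===== PORT A =====
-- first loop: for idx in range(len(lst)): if name in lst[idx]: del_idxs.append(idx)
-- (lst[idx] is always in range here, so it is ported as getD idx [])
def pvDelIdxs (qianqu_houji_list : List (List String)) (del_layer_name : String) : List Nat :=
  (List.range qianqu_houji_list.length).foldl
    (fun del_idxs idx =>
      let single := qianqu_houji_list.getD idx []
      if del_layer_name ∈ single then del_idxs ++ [idx] else del_idxs) []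

-- second loop: for idx in del_idxs: del lst[idx - del_flag]; del_flag += 1
-- (the deleted index is always in range, so `del` is ported as eraseIdx)
def pvDelLoop : List (List String) → List Nat → Nat → List (List String)
  | lst, [], _ => lst
  | lst, idx :: rest, del_flag => pvDelLoop (lst.eraseIdx (idx - del_flag)) rest (del_flag + 1)

def del_Cascade_op_info (qianqu_houji_list : List (List String)) (del_layer_name : String) : List (List String) :=
  pvDelLoop qianqu_houji_list (pvDelIdxs qianqu_houji_list del_layer_name) 0

-- ===== PORT B =====
-- while idx >= 0: if name in lst[idx]: del lst[idx]; idx -= 1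
-- ported as a countdown on idx+1 (fuel i means the next index examined is i-1)
def pvAltLoop (del_layer_name : String) : Nat → List (List String) → List (List String)
  | 0, lst => lst
  | i + 1, lst =>
      pvAltLoop del_layer_name i
        (if del_layer_name ∈ lst.getD i [] then lst.eraseIdx i else lst)

def del_Cascade_op_info_alt (qianqu_houji_list : List (List String)) (del_layer_name : String) : List (List String) :=
  pvAltLoop del_layer_name qianqu_houji_list.length qianqu_houji_list

-- ===== PRECONDITION & SPEC =====
def Spec_del_Cascade_op_info (qianqu_houji_list : List (List String)) (del_layer_name : String) (out : List (List String)) : Prop := out = del_Cascade_op_info_alt qianqu_houji_list del_layer_name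
instance (qianqu_houji_list : List (List String)) (del_layer_name : String) (out : List (List String)) : Decidable (Spec_del_Cascade_op_info qianqu_houji_list del_layer_name out) := by unfold Spec_del_Cascade_op_info; infer_instance

-- ===== CLAIM (what is proved, stated in full; the proofs are below) =====
def Claim_equal_del_Cascade_op_info : Prop := ∀ (qianqu_houji_list : List (List String)) (del_layer_name : String), Dom_del_Cascade_op_info qianqu_houji_list del_layer_name → Spec_del_Cascade_op_info qianqu_houji_list del_layer_name (del_Cascade_op_info qianqu_houji_list del_layer_name)

-- ===== LEMMAS AND PROOFS =====

-- indices (in increasing order) of the rows containing the name, defined structurally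
def pvMemIdxs (del_layer_name : String) : List (List String) → List Nat
  | [] => []
  | x :: xs =>
      (if del_layer_name ∈ x then [0] else []) ++ (pvMemIdxs del_layer_name xs).map (· + 1)

theorem pvDelIdxs_eq_filter (l : List (List String)) (name : String) :
    pvDelIdxs l name =
      (List.range l.length).filter (fun idx => decide (name ∈ l.getD idx [])) := by
  unfold pvDelIdxs
  simpa using PySem.List.foldl_append_ite_eq_filter
    (p := fun idx => name ∈ l.getD idx []) (l := List.range l.length) (acc := [])

theorem pvFilterRange_eq_memIdxs (name : String) (l : List (List String)) :
    (List.range l.length).filter (fun idx => decide (name ∈ l.getD idx [])) =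
      pvMemIdxs name l := by
  induction l with
  | nil => simp [pvMemIdxs]
  | cons x xs ih =>
      rw [List.length_cons, List.range_succ_eq_map, List.filter_cons, List.filter_map]
      by_cases h : name ∈ x
      · simp only [List.getD_cons_zero, h, decide_true, if_pos, pvMemIdxs, ← ih]
        rfl
      · simp only [List.getD_cons_zero, h, decide_false, Bool.false_eq_true, pvMemIdxs, ← ih]
        rfl

theorem pvMemIdxs_pairwise (name : String) (l : List (List String)) :
    (pvMemIdxs name l).Pairwise (· < ·) := by
  induction l with
  | nil => exact List.Pairwise.nil
  | cons x xs ih =>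
      unfold pvMemIdxs
      by_cases h : name ∈ x
      · simp only [h, if_pos]
        refine List.pairwise_cons.2 ⟨?_, ?_⟩
        · intro j hj
          rcases List.mem_map.1 hj with ⟨i, _, rfl⟩; omega
        · exact (List.pairwise_map).2 (ih.imp (by omega))
      · rw [if_neg h, List.nil_append]
        exact (List.pairwise_map).2 (ih.imp (by omega))

-- pvDelLoop ignores a simultaneous +1 shift of all indices and of the flag
theorem pvDelLoop_shift (I : List Nat) : ∀ (l : List (List String)) (f : Nat),
    pvDelLoop l (I.map (· + 1)) (f + 1) = pvDelLoop l I f := by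
  induction I with
  | nil => intro l f; rfl
  | cons i is ih =>
      intro l f
      simp only [List.map_cons, pvDelLoop, Nat.add_sub_add_right]
      exact ih _ _

-- deletions at shifted indices never touch the head
theorem pvDelLoop_head (x : List String) (I : List Nat) :
    ∀ (l : List (List String)) (f : Nat), I.Pairwise (· < ·) → (∀ i ∈ I, f ≤ i) →
    pvDelLoop (x :: l) (I.map (· + 1)) f = x :: pvDelLoop l I f := by
  induction I with
  | nil => intro l f _ _; rfl
  | cons i is ih =>
      intro l f hpw hge
      have hfi : f ≤ i := hge i (List.mem_cons_self ..)
      have h1 : i + 1 - f = (i - f) + 1 := by omega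
      simp only [List.map_cons, pvDelLoop, h1, List.eraseIdx_cons_succ]
      refine ih _ _ (List.pairwise_cons.1 hpw).2 ?_
      intro j hj
      have := (List.pairwise_cons.1 hpw).1 j hj
      omega

theorem pvDelLoop_memIdxs (name : String) (l : List (List String)) :
    pvDelLoop l (pvMemIdxs name l) 0 = l.filter (fun r => !decide (name ∈ r)) := by
  induction l with
  | nil => rfl
  | cons x xs ih =>
      unfold pvMemIdxs
      by_cases h : name ∈ x
      · simp only [h, if_pos, List.cons_append, List.nil_append, pvDelLoop,
          List.eraseIdx_cons_zero, Nat.sub_zero, pvDelLoop_shift, ih, List.filter_cons,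
          decide_true, Bool.not_true]
        simp
      · rw [if_neg h, List.nil_append,
          pvDelLoop_head x _ xs 0 (pvMemIdxs_pairwise name xs) (fun i _ => Nat.zero_le i), ih]
        simp [h]

theorem pvA_eq_filter (l : List (List String)) (name : String) :
    del_Cascade_op_info l name = l.filter (fun r => !decide (name ∈ r)) := by
  rw [del_Cascade_op_info, pvDelIdxs_eq_filter, pvFilterRange_eq_memIdxs, pvDelLoop_memIdxs]

theorem pvAltLoop_spec (name : String) (l1 : List (List String)) :
    ∀ l2 : List (List String),
      pvAltLoop name l1.length (l1 ++ l2) = l1.filter (fun r => !decide (name ∈ r)) ++ l2 := by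
  induction l1 using List.reverseRecOn with
  | nil => intro l2; simp [pvAltLoop]
  | append_singleton ys x ih =>
      intro l2
      have hlen : (ys ++ [x]).length = ys.length + 1 := by simp
      have hget : ((ys ++ [x]) ++ l2).getD ys.length [] = x := by
        rw [List.append_assoc, List.getD_eq_getElem?_getD,
          List.getElem?_append_right (Nat.le_refl _)]
        simp
      have herase : ((ys ++ [x]) ++ l2).eraseIdx ys.length = ys ++ l2 := by
        rw [List.append_assoc, List.eraseIdx_append_of_length_le (Nat.le_refl _)]
        simp
      rw [hlen]
      simp only [pvAltLoop, hget]
      by_cases h : name ∈ x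
      · rw [if_pos h, herase, ih l2]
        simp [h]
      · rw [if_neg h, List.append_assoc, List.singleton_append, ih (x :: l2)]
        simp [h]

theorem pvB_eq_filter (l : List (List String)) (name : String) :
    del_Cascade_op_info_alt l name = l.filter (fun r => !decide (name ∈ r)) := by
  have := pvAltLoop_spec name l []
  simpa [del_Cascade_op_info_alt] using this

-- ===== VERDICT (by name: the statement is the Claim_ definition above) =====
theorem del_Cascade_op_info_spec : Claim_equal_del_Cascade_op_info := by
  intro l name _
  unfold Spec_del_Cascade_op_info
  rw [pvA_eq_filter, pvB_eq_filter]
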